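-- pv_equiv track=rewrite | github.com/Amanuel94/CF-Solutions | H_Tell_Directions.py | dfs
-- ===== SOURCE A (Python) =====
-- def inBound(i, j, n, m):
--     return 0 <= i < n and 0 <= j < m
--
-- def dfs(node,grid, path, k):
--     if len(path) > k:
--         return False
--
--     x, y = node
--     if inBound(x, y, len(grid), len(grid[0])) and grid[x][y] == "X" and len(path) == k:
--         return True
--     dir = {
--         "D":(1, 0),
--         "L":(0, -1),
--         "R":(0, 1),
--         "U":(-1, 0)
--     }
--     for d in "DLRU":
--         dx, dy = dir[d]
--         tx, ty = x+dx, y + dy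
--         if inBound(tx, ty, len(grid), len(grid[0])):
--             if grid[tx][ty] in "X.":
--                 path.append(d)
--                 if dfs((tx, ty),grid, path, k) :
--                     return True
--                 path.pop()
--     return False
-- ===== SOURCE B (Python) =====
-- def dfs(node, grid, path, k):
--     # Layered reachability: frontier of cells reachable after each remaining step.
--     # Note: unlike A, this does not mutate `path`; equivalence is about the return value.
--     r = k - len(path)
--     if r < 0:
--         return False
--     n, m = len(grid), len(grid[0])
--
--     def passable(i, j):
--         return 0 <= i < n and 0 <= j < m and grid[i][j] in "X."
--
--     frontier = {(node[0], node[1])}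
--     for _ in range(r):
--         if not frontier:
--             return False
--         nxt = set()
--         for (i, j) in frontier:
--             for di, dj in ((1, 0), (0, -1), (0, 1), (-1, 0)):
--                 if passable(i + di, j + dj):
--                     nxt.add((i + di, j + dj))
--         frontier = nxt
--     return any(0 <= i < n and 0 <= j < m and grid[i][j] == "X" for (i, j) in frontier)
-- ===== Notes on version B (the rewrite author's own statement) =====
-- stated objective: alternative
-- what changed: Replaced A's backtracking DFS over individual length-k move sequences by a layered reachability BFS/DP: iterate the frontier set of reachable cells (k - len(path)) times and test whether any frontier cell is 'X'.
-- outside the precondition, e.g. on dfs((0, 0), [['#', '#'], ['#']], [], 1): A returns False, B returns False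
import Mathlib
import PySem

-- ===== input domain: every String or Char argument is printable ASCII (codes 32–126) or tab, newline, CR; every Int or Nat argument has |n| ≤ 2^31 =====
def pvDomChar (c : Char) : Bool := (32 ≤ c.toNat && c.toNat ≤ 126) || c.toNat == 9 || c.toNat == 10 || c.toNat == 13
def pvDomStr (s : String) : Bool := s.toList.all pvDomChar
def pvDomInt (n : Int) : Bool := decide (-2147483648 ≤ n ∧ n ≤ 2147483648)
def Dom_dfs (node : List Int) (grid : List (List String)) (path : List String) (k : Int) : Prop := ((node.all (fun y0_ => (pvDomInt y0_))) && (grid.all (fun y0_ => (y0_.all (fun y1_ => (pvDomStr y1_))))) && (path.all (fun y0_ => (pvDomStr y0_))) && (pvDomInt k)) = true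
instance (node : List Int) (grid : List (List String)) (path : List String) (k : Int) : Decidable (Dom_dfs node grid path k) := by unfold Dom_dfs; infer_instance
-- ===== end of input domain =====

-- B replaces A's backtracking DFS over individual length-k move sequences by a layered
-- reachability BFS (a frontier set of cells iterated k - len(path) times);
-- equivalence is about the RETURN value only: A mutates `path` (append/pop), B does not.

-- ===== PORT A =====
-- Python's inBound
def inBound (i j n m : Int) : Bool :=
  decide (0 ≤ i ∧ i < n) && decide (0 ≤ j ∧ j < m)

-- grid[i][j]; the .getD defaults are never read on Pre_: every access is guarded by
-- an in-bound test and Pre_dfs makes the guarded accesses in range.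
def cellAt (grid : List (List String)) (i j : Int) : String :=
  (PySem.List.pyGet? ((PySem.List.pyGet? grid i).getD []) j).getD ""

-- Literal port of A. The 'for d in "DLRU"' loop with early return is unrolled into the
-- four short-circuit arms in loop order (D, L, R, U) with dir[d] inlined; Python's
-- path.append(d) / recursive call / path.pop() backtracking is the call on path ++ [d]
-- (the original list is reused unchanged in the later arms, exactly as after .pop()).
def dfs (node : List Int) (grid : List (List String)) (path : List String) (k : Int) : Bool :=
  if h : (path.length : Int) > k then false
  else
    let x := node.headD 0
    let y := (node.drop 1).headD 0
    let n : Int := grid.length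
    let m : Int := ((grid.headD []).length : Int)
    if inBound x y n m && (cellAt grid x y == "X") && ((path.length : Int) == k) then true
    else
      (if inBound (x+1) y n m && PySem.Str.isIn (cellAt grid (x+1) y) "X." then
          dfs [x+1, y] grid (path ++ ["D"]) k else false) ||
      (if inBound x (y-1) n m && PySem.Str.isIn (cellAt grid x (y-1)) "X." then
          dfs [x, y-1] grid (path ++ ["L"]) k else false) ||
      (if inBound x (y+1) n m && PySem.Str.isIn (cellAt grid x (y+1)) "X." then
          dfs [x, y+1] grid (path ++ ["R"]) k else false) ||
      (if inBound (x-1) y n m && PySem.Str.isIn (cellAt grid (x-1) y) "X." then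
          dfs [x-1, y] grid (path ++ ["U"]) k else false)
termination_by (k + 1 - (path.length : Int)).toNat
decreasing_by all_goals (simp only [List.length_append, List.length_cons, List.length_nil] at *; omega)

-- ===== PORT B =====
-- Source B's local 'passable'
def passableB (grid : List (List String)) (n m i j : Int) : Bool :=
  decide (0 ≤ i ∧ i < n) && decide (0 ≤ j ∧ j < m) && PySem.Str.isIn (cellAt grid i j) "X."

def dirsB : List (Int × Int) := [(1, 0), (0, -1), (0, 1), (-1, 0)]

-- body of Source B's 'for _ in range(r)' loop: the next frontier set
def expandB (grid : List (List String)) (n m : Int) (frontier : PySem.Set (Int × Int)) : PySem.Set (Int × Int) :=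
  frontier.foldl
    (fun nxt p => dirsB.foldl
      (fun nxt d =>
        if passableB grid n m (p.1 + d.1) (p.2 + d.2) then PySem.Set.add nxt (p.1 + d.1, p.2 + d.2) else nxt)
      nxt)
    PySem.Set.empty

-- 'for _ in range(r)' with the early 'return False' on an empty frontier, then the final any(...)
def loopB (grid : List (List String)) (n m : Int) : Nat → PySem.Set (Int × Int) → Bool
  | 0, frontier =>
      frontier.any (fun p => decide (0 ≤ p.1 ∧ p.1 < n) && decide (0 ≤ p.2 ∧ p.2 < m) && (cellAt grid p.1 p.2 == "X"))
  | r + 1, frontier =>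
      if frontier.isEmpty then false else loopB grid n m r (expandB grid n m frontier)

def dfs_alt (node : List Int) (grid : List (List String)) (path : List String) (k : Int) : Bool :=
  let r : Int := k - (path.length : Int)
  if r < 0 then false
  else
    let n : Int := grid.length
    let m : Int := ((grid.headD []).length : Int)
    loopB grid n m r.toNat (PySem.Set.add PySem.Set.empty (node.headD 0, (node.drop 1).headD 0))

-- ===== PRECONDITION & SPEC =====
-- Pre_ excludes exactly the inputs where Python A raises: when the len(path) > k guard
-- does not return immediately, A unpacks node (needs exactly 2 entries), reads len(grid[0])
-- (needs a nonempty grid) and may index any cell grid[i][j] with j < len(grid[0]), which can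
-- raise on a ragged grid whose later rows are shorter than row 0 (even on some ragged grids
-- where A happens to return, e.g. the unreachable short row of the cited input).
def Pre_dfs (node : List Int) (grid : List (List String)) (path : List String) (k : Int) : Prop :=
  (path.length : Int) > k ∨
  (node.length = 2 ∧ grid ≠ [] ∧ ∀ row ∈ grid, (grid.headD []).length ≤ row.length)
instance (node : List Int) (grid : List (List String)) (path : List String) (k : Int) : Decidable (Pre_dfs node grid path k) := by unfold Pre_dfs; infer_instance

def pvWitness_dfs : List Int × List (List String) × List String × Int := ([0, 0], [["X"]], [], 0)

def Spec_dfs (node : List Int) (grid : List (List String)) (path : List String) (k : Int) (out : Bool) : Prop := out = dfs_alt node grid path k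
instance (node : List Int) (grid : List (List String)) (path : List String) (k : Int) (out : Bool) : Decidable (Spec_dfs node grid path k out) := by unfold Spec_dfs; infer_instance

-- ===== CLAIM (what is proved, stated in full; the proofs are below) =====
def Claim_equal_dfs : Prop := ∀ (node : List Int) (grid : List (List String)) (path : List String) (k : Int), Dom_dfs node grid path k → Pre_dfs node grid path k → Spec_dfs node grid path k (dfs node grid path k)

-- ===== LEMMAS AND PROOFS =====

-- success predicate "from cell p, with r steps left, a winning walk exists"
def W (grid : List (List String)) (n m : Int) : Nat → Int × Int → Bool
  | 0, p => decide (0 ≤ p.1 ∧ p.1 < n) && decide (0 ≤ p.2 ∧ p.2 < m) && (cellAt grid p.1 p.2 == "X")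
  | r + 1, p => dirsB.any (fun d => passableB grid n m (p.1 + d.1) (p.2 + d.2) && W grid n m r (p.1 + d.1, p.2 + d.2))

lemma dfs_gt (node : List Int) (grid : List (List String)) (path : List String) (k : Int)
    (h : (path.length : Int) > k) : dfs node grid path k = false := by
  rw [dfs]; simp [h]

lemma dfs_eq_W (grid : List (List String)) (k : Int) :
    ∀ (r : Nat) (node : List Int) (path : List String), k - (path.length : Int) = (r : Int) →
      dfs node grid path k
        = W grid (grid.length) ((grid.headD []).length) r (node.headD 0, (node.drop 1).headD 0) := by
  intro r
  induction r with
  | zero =>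
    intro node path h
    rw [dfs, dif_neg (by omega)]
    simp only []
    have hgt : ∀ d : String, ((path ++ [d]).length : Int) > k := by
      intro d; simp only [List.length_append, List.length_cons, List.length_nil]; push_cast; omega
    rw [dfs_gt _ _ _ _ (hgt "D"), dfs_gt _ _ _ _ (hgt "L"), dfs_gt _ _ _ _ (hgt "R"), dfs_gt _ _ _ _ (hgt "U")]
    have hk : ((path.length : Int) == k) = true := by simp; omega
    simp only [hk, Bool.and_true, ite_self, Bool.or_false, W, inBound]
    by_cases hc : (decide (0 ≤ (node.headD 0) ∧ (node.headD 0) < (grid.length : Int)) &&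
        decide (0 ≤ ((node.drop 1).headD 0) ∧ ((node.drop 1).headD 0) < ((grid.headD []).length : Int)) &&
        (cellAt grid (node.headD 0) ((node.drop 1).headD 0) == "X")) = true
    · rw [if_pos hc, hc]
    · rw [if_neg hc]; simp only [Bool.not_eq_true] at hc; rw [hc]
  | succ r ih =>
    intro node path h
    rw [dfs, dif_neg (by omega)]
    simp only []
    have hk : ((path.length : Int) == k) = false := by simp; omega
    have hlen : ∀ d : String, k - (((path ++ [d]).length : Int)) = (r : Int) := by
      intro d; simp only [List.length_append, List.length_cons, List.length_nil]; push_cast; omega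
    rw [ih _ _ (hlen "D"), ih _ _ (hlen "L"), ih _ _ (hlen "R"), ih _ _ (hlen "U")]
    simp only [hk, Bool.and_false, W, dirsB, List.any_cons, List.any_nil, Bool.or_false,
      inBound, passableB]
    simp only [List.headD_cons, List.drop_succ_cons, List.drop_one]
    simp only [Bool.false_eq_true, if_false, List.drop_zero, List.headD_cons,
      Bool.if_false_right, Bool.decide_eq_true, Bool.or_assoc, add_zero, ← sub_eq_add_neg]

lemma mem_dirfold (grid : List (List String)) (n m : Int) (p : Int × Int) :
    ∀ (ds : List (Int × Int)) (nxt : PySem.Set (Int × Int)) (q : Int × Int),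
      (q ∈ ds.foldl
        (fun nxt d =>
          if passableB grid n m (p.1 + d.1) (p.2 + d.2) then PySem.Set.add nxt (p.1 + d.1, p.2 + d.2) else nxt)
        nxt)
      ↔ q ∈ nxt ∨ ∃ d ∈ ds, q = (p.1 + d.1, p.2 + d.2) ∧ passableB grid n m q.1 q.2 = true := by
  intro ds
  induction ds with
  | nil => simp
  | cons d ds ih =>
    intro nxt q
    simp only [List.foldl_cons]
    by_cases hp : passableB grid n m (p.1 + d.1) (p.2 + d.2) = true
    · rw [if_pos hp, ih]
      simp only [PySem.Set.mem_add, List.mem_cons]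
      constructor
      · rintro (⟨h | rfl⟩ | ⟨e, he, rfl, hpe⟩)
        · exact Or.inl h
        · exact Or.inr ⟨d, Or.inl rfl, rfl, hp⟩
        · exact Or.inr ⟨e, Or.inr he, rfl, hpe⟩
      · rintro (h | ⟨e, (rfl | he), rfl, hpe⟩)
        · exact Or.inl (Or.inl h)
        · exact Or.inl (Or.inr rfl)
        · exact Or.inr ⟨e, he, rfl, hpe⟩
    · rw [if_neg hp, ih]
      simp only [List.mem_cons]
      constructor
      · rintro (h | ⟨e, he, rfl, hpe⟩)
        · exact Or.inl h
        · exact Or.inr ⟨e, Or.inr he, rfl, hpe⟩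
      · rintro (h | ⟨e, (rfl | he), rfl, hpe⟩)
        · exact Or.inl h
        · exact absurd hpe hp
        · exact Or.inr ⟨e, he, rfl, hpe⟩

lemma mem_outerfold (grid : List (List String)) (n m : Int) :
    ∀ (S : List (Int × Int)) (acc : PySem.Set (Int × Int)) (q : Int × Int),
      (q ∈ S.foldl
        (fun nxt p => dirsB.foldl
          (fun nxt d =>
            if passableB grid n m (p.1 + d.1) (p.2 + d.2) then PySem.Set.add nxt (p.1 + d.1, p.2 + d.2) else nxt)
          nxt)
        acc)
      ↔ q ∈ acc ∨ ∃ p ∈ S, ∃ d ∈ dirsB, q = (p.1 + d.1, p.2 + d.2) ∧ passableB grid n m q.1 q.2 = true := by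
  intro S
  induction S with
  | nil => simp
  | cons p S ih =>
    intro acc q
    simp only [List.foldl_cons, ih, mem_dirfold, List.mem_cons]
    constructor
    · rintro (⟨h | ⟨d, hd, rfl, hp⟩⟩ | ⟨e, he, d, hd, rfl, hp⟩)
      · exact Or.inl h
      · exact Or.inr ⟨p, Or.inl rfl, d, hd, rfl, hp⟩
      · exact Or.inr ⟨e, Or.inr he, d, hd, rfl, hp⟩
    · rintro (h | ⟨e, (rfl | he), d, hd, rfl, hp⟩)
      · exact Or.inl (Or.inl h)
      · exact Or.inl (Or.inr ⟨d, hd, rfl, hp⟩)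
      · exact Or.inr ⟨e, he, d, hd, rfl, hp⟩

lemma mem_expandB (grid : List (List String)) (n m : Int) (S : PySem.Set (Int × Int)) (q : Int × Int) :
    q ∈ expandB grid n m S
      ↔ ∃ p ∈ S, ∃ d ∈ dirsB, q = (p.1 + d.1, p.2 + d.2) ∧ passableB grid n m q.1 q.2 = true := by
  unfold expandB
  rw [mem_outerfold]
  simp [PySem.Set.empty]

lemma loopB_eq_any_W (grid : List (List String)) (n m : Int) :
    ∀ (r : Nat) (S : PySem.Set (Int × Int)), loopB grid n m r S = S.any (W grid n m r) := by
  intro r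
  induction r with
  | zero => intro S; simp [loopB, W]
  | succ r ih =>
    intro S
    rw [loopB, ih]
    cases S with
    | nil => simp
    | cons p S =>
      rw [if_neg (by simp)]
      rw [Bool.eq_iff_iff]
      simp only [List.any_eq_true, mem_expandB, W, Bool.and_eq_true]
      constructor
      · rintro ⟨q, ⟨e, he, d, hd, rfl, hp⟩, hw⟩
        exact ⟨e, he, d, hd, hp, hw⟩
      · rintro ⟨e, he, d, hd, hp, hw⟩
        refine ⟨(e.1 + d.1, e.2 + d.2), ⟨e, he, d, hd, rfl, ?_⟩, hw⟩
        exact hp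

-- ===== VERDICT (by name: the statement is the Claim_ definition above) =====
theorem dfs_spec : Claim_equal_dfs := by
  intro node grid path k _hdom _hpre
  unfold Spec_dfs
  by_cases hg : (path.length : Int) > k
  · rw [dfs_gt node grid path k hg]
    unfold dfs_alt
    rw [if_pos (by omega)]
  · have hr : k - (path.length : Int) = ((k - (path.length : Int)).toNat : Int) := by omega
    rw [dfs_eq_W grid k _ node path hr]
    unfold dfs_alt
    rw [if_neg (by omega)]
    rw [loopB_eq_any_W]
    simp [PySem.Set.add, PySem.Set.empty]
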